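-- pv_equiv track=rewrite | github.com/valimised/evalimine | ivote-server/cgi/sigvalidator.py | check_dataobjects
-- ===== SOURCE A (Python) =====
-- def check_prefix(inp, prefix):
--     if inp.startswith(prefix):
--         return len(prefix)
--     return -1
--
-- def check_dataobjects(inp, questions):
--     data_object = "<xades:DataObjectFormat ObjectReference=\"#S0-ref-%d\">\n" + \
--                   "<xades:MimeType>application/octet-stream</xades:MimeType>\n" + \
--                   "</xades:DataObjectFormat>\n"
--     offset = 0
--     for i in range(len(questions)):
--         ret = check_prefix(inp[offset:], data_object % i)
--         if ret == -1:
--             return -1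
--         offset += ret
--
--     return offset
-- ===== SOURCE B (Python) =====
-- def check_dataobjects(inp, questions):
--     data_object = "<xades:DataObjectFormat ObjectReference=\"#S0-ref-%d\">\n" + \
--                   "<xades:MimeType>application/octet-stream</xades:MimeType>\n" + \
--                   "</xades:DataObjectFormat>\n"
--     expected = "".join(data_object % i for i in range(len(questions)))
--     if inp.startswith(expected):
--         return len(expected)
--     return -1
-- ===== Notes on version B (the rewrite author's own statement) =====
-- stated objective: simpler
-- what changed: Replaced the offset-tracking loop with per-block early-exit prefix checks (and its check_prefix helper) by materializing the whole expected concatenation once and doing a single startswith comparison.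
import Mathlib
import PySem

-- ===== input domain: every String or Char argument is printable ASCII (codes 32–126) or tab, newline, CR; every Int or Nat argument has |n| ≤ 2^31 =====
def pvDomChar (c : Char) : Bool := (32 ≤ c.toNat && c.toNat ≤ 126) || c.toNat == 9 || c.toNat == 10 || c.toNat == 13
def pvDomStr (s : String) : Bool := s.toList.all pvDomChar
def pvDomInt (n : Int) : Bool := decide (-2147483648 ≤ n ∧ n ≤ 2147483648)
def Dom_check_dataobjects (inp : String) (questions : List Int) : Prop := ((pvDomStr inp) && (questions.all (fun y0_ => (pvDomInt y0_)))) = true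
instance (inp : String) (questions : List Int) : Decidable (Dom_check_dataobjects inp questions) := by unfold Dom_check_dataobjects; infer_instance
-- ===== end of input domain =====

-- B replaces A's offset-accumulating loop of per-block prefix checks (with early exit) by building the
-- whole expected concatenation once and doing a single startswith comparison; objective: simpler.

-- the data_object template, split at its single %d placeholder (shared string data of both programs)
def pvTemplPre : List Char := "<xades:DataObjectFormat ObjectReference=\"#S0-ref-".toList
def pvTemplPost : List Char := "\">\n<xades:MimeType>application/octet-stream</xades:MimeType>\n</xades:DataObjectFormat>\n".toList

-- ===== PORT A =====
def pv_check_prefix (inp pre : List Char) : Int :=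
  if PySem.Chars.startswith inp pre then PySem.List.len pre else -1

def pv_blockA (i : Int) : List Char := pvTemplPre ++ PySem.Int.toChars i ++ pvTemplPost

def pv_loopA (s : List Char) (offset : Int) : List Int → Int
  | [] => offset
  | i :: rest =>
    let ret := pv_check_prefix (PySem.List.slice s (some offset) none) (pv_blockA i)
    if ret = -1 then -1 else pv_loopA s (offset + ret) rest

def check_dataobjects (inp : String) (questions : List Int) : Int :=
  pv_loopA inp.toList 0 (PySem.List.pyRange 0 (PySem.List.len questions) 1)

-- ===== PORT B =====
def pv_blockB (i : Int) : List Char := pvTemplPre ++ PySem.Int.toChars i ++ pvTemplPost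

def check_dataobjects_alt (inp : String) (questions : List Int) : Int :=
  let expected := PySem.Chars.join []
    ((PySem.List.pyRange 0 (PySem.List.len questions) 1).map pv_blockB)
  if PySem.Chars.startswith inp.toList expected then PySem.List.len expected else -1

-- ===== PRECONDITION & SPEC =====
def Spec_check_dataobjects (inp : String) (questions : List Int) (out : Int) : Prop := out = check_dataobjects_alt inp questions
instance (inp : String) (questions : List Int) (out : Int) : Decidable (Spec_check_dataobjects inp questions out) := by unfold Spec_check_dataobjects; infer_instance

-- ===== CLAIM (what is proved, stated in full; the proofs are below) =====
def Claim_equal_check_dataobjects : Prop := ∀ (inp : String) (questions : List Int), Dom_check_dataobjects inp questions → Spec_check_dataobjects inp questions (check_dataobjects inp questions)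

-- ===== LEMMAS AND PROOFS =====
lemma pv_append_prefix_iff (a b s : List Char) :
    (a ++ b) <+: s ↔ a <+: s ∧ b <+: s.drop a.length := by
  constructor
  · rintro ⟨t, rfl⟩
    exact ⟨⟨b ++ t, by simp⟩, ⟨t, by simp⟩⟩
  · rintro ⟨⟨u, rfl⟩, hb⟩
    rw [List.drop_left] at hb
    obtain ⟨t, rfl⟩ := hb
    exact ⟨t, by simp⟩

lemma pv_join_nil_eq_flatten (parts : List (List Char)) :
    PySem.Chars.join [] parts = parts.flatten := by
  induction parts with
  | nil => rfl
  | cons p ps ih =>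
    cases ps with
    | nil => simp [PySem.Chars.join, List.intercalate]
    | cons q t =>
      show List.intercalate [] (p :: q :: t) = _
      have : List.intercalate [] (p :: q :: t) = p ++ List.intercalate [] (q :: t) := by
        simp [List.intercalate, List.intersperse]
      rw [this]
      simpa using ih

lemma pv_loopA_eq (s : List Char) (idxs : List Int) (off : Nat) :
    pv_loopA s (off : Int) idxs =
      if (idxs.map pv_blockA).flatten <+: s.drop off then
        ((off + (idxs.map pv_blockA).flatten.length : Nat) : Int)
      else -1 := by
  induction idxs generalizing off with
  | nil => simp [pv_loopA]
  | cons i rest ih =>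
    rw [pv_loopA, pv_check_prefix, PySem.List.slice_from_natCast]
    by_cases h : PySem.Chars.startswith (s.drop off) (pv_blockA i) = true
    · rw [if_pos h]
      simp only [PySem.List.len_eq]
      have hne : ((pv_blockA i).length : Int) ≠ -1 := by omega
      rw [if_neg hne]
      have hcast : ((off : Int) + ((pv_blockA i).length : Int)) = ((off + (pv_blockA i).length : Nat) : Int) := by push_cast; ring
      rw [hcast, ih]
      have hpre : pv_blockA i <+: s.drop off := (PySem.Chars.startswith_iff _ _).mp h
      simp only [List.map_cons, List.flatten_cons, pv_append_prefix_iff, List.drop_drop]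
      by_cases h2 : (rest.map pv_blockA).flatten <+: s.drop (off + (pv_blockA i).length)
      · rw [if_pos h2, if_pos ⟨hpre, h2⟩]
        congr 1
        simp [List.length_append]
        omega
      · rw [if_neg h2, if_neg (by rintro ⟨-, hb⟩; exact h2 hb)]
    · rw [if_neg h, if_pos rfl]
      have hnp : ¬ pv_blockA i <+: s.drop off := fun hp => h ((PySem.Chars.startswith_iff _ _).mpr hp)
      rw [List.map_cons, List.flatten_cons,
          if_neg (by rw [pv_append_prefix_iff]; rintro ⟨ha, -⟩; exact hnp ha)]

-- ===== VERDICT (by name: the statement is the Claim_ definition above) =====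
theorem check_dataobjects_spec : Claim_equal_check_dataobjects := by
  intro inp questions _
  unfold Spec_check_dataobjects check_dataobjects check_dataobjects_alt
  have hB : pv_blockB = pv_blockA := rfl
  rw [hB, pv_join_nil_eq_flatten]
  generalize PySem.List.pyRange 0 (PySem.List.len questions) 1 = idxs
  have h00 := pv_loopA_eq inp.toList idxs 0
  simp only [Nat.cast_zero, List.drop_zero, Nat.zero_add] at h00
  rw [h00]
  simp only [PySem.List.len_eq]
  by_cases h : (idxs.map pv_blockA).flatten <+: inp.toList
  · rw [if_pos h, if_pos ((PySem.Chars.startswith_iff _ _).mpr h)]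
  · rw [if_neg h, if_neg (fun hs => h ((PySem.Chars.startswith_iff _ _).mp hs))]
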